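-- pv_equiv track=rewrite | github.com/Renee751/Data_Analytics_Python_Github | Module2-Functions-loops-conditionals/for/main.py | alphabet_set
-- ===== SOURCE A (Python) =====
-- def alphabet_set(countries):
--     countries_lower = [country.lower() for country in countries]
--     alphabet = list("abcdefghijklmnopqrstuvwxyz")
--     found_countries = []
--     for country in countries_lower:
--         for letter in country:
--             if letter in alphabet:
--                 alphabet.remove(letter)
--                 if country not in found_countries:
--                     found_countries.append(country)
--         if alphabet == list() and len(found_countries)<= 1:
--             break
--     return (found_countries)
-- ===== SOURCE B (Python) =====
-- def alphabet_set(countries):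
--     lows = [c.lower() for c in countries]
--     idxs = set()
--     for ch in "abcdefghijklmnopqrstuvwxyz":
--         for i, c in enumerate(lows):
--             if ch in c:
--                 idxs.add(i)
--                 break
--     return [lows[i] for i in sorted(idxs)]
-- ===== Notes on version B (the rewrite author's own statement) =====
-- stated objective: alternative
-- what changed: Letter-driven instead of country-driven: for each of the 26 letters B finds the index of the first country containing it, then returns the countries at the sorted distinct first-occurrence indices, replacing A's sequential scan with a shrinking alphabet list and per-letter remove/membership bookkeeping.
import Mathlib
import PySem

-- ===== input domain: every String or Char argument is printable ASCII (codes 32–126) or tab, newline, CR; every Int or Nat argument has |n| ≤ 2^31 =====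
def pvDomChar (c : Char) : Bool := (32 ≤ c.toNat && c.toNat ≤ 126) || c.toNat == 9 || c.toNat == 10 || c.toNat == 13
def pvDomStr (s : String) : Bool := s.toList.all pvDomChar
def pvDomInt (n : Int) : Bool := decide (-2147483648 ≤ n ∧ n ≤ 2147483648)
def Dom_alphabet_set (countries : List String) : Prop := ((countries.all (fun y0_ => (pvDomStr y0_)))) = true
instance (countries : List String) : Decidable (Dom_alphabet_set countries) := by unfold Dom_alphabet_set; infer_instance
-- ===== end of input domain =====

-- B is letter-driven instead of country-driven: per letter, the first country containing it;
-- result = countries at the sorted distinct first-occurrence indices (alternative algorithm, same result).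

-- ===== PORT A =====
def azChars : List Char := "abcdefghijklmnopqrstuvwxyz".toList

-- the inner 'for letter in country' loop; state (alphabet, found_countries)
def pvInnerA (country : String) : List Char → List Char → List String → List Char × List String
  | [], alphabet, found => (alphabet, found)
  | l :: rest, alphabet, found =>
    if alphabet.contains l then
      -- alphabet.remove(letter): exact here, the guard ensures the letter is present
      pvInnerA country rest ((PySem.List.remove? alphabet l).getD alphabet)
        (if found.contains country then found else found ++ [country])
    else pvInnerA country rest alphabet found

-- the outer 'for country in countries_lower' loop with its break
def pvOuterA : List String → List Char → List String → List String
  | [], _, found => found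
  | c :: rest, alphabet, found =>
    let st := pvInnerA c c.toList alphabet found
    if st.1 = [] ∧ st.2.length ≤ 1 then st.2 else pvOuterA rest st.1 st.2

def alphabet_set (countries : List String) : List String :=
  pvOuterA (countries.map PySem.Str.lower) azChars []

-- ===== PORT B =====
-- inner 'for i, c in enumerate(lows): if ch in c: idxs.add(i); break'
-- ('ch in c' is a 1-character substring test = List.contains, exact)
def pvInnerB (ch : Char) (s : PySem.Set Int) : List (Int × String) → PySem.Set Int
  | [] => s
  | p :: rest => if p.2.toList.contains ch then PySem.Set.add s p.1 else pvInnerB ch s rest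

def alphabet_set_alt (countries : List String) : List String :=
  let lows := countries.map PySem.Str.lower
  let idxs := azChars.foldl (fun s ch => pvInnerB ch s (PySem.List.enumerate lows)) (PySem.Set.empty : PySem.Set Int)
  -- lows[i]: every i in idxs is an enumerate index, hence in range — pyGetD is exact here
  (PySem.List.sorted idxs (fun x => x) false).map (fun i => PySem.List.pyGetD lows i "")

-- ===== PRECONDITION & SPEC =====
def Spec_alphabet_set (countries : List String) (out : List String) : Prop := out = alphabet_set_alt countries
instance (countries : List String) (out : List String) : Decidable (Spec_alphabet_set countries out) := by unfold Spec_alphabet_set; infer_instance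

-- ===== CLAIM (what is proved, stated in full; the proofs are below) =====
def Claim_equal_alphabet_set : Prop := ∀ (countries : List String), Dom_alphabet_set countries → Spec_alphabet_set countries (alphabet_set countries)

-- ===== LEMMAS AND PROOFS =====

def pvAZ : PySem.Set Char := PySem.Set.ofList "abcdefghijklmnopqrstuvwxyz".toList

-- greedy step on an already-lowercased country (proof-side reference form)
def pvGStep (st : PySem.Set Char × List String) (c : String) : PySem.Set Char × List String :=
  let new := PySem.Set.diff (PySem.Set.inter pvAZ (PySem.Set.ofList c.toList)) st.1
  if new = [] then st else (PySem.Set.union st.1 new, st.2 ++ [c])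

theorem pvInnerA_eq (letters : List Char) (country : String) (alphabet : List Char)
    (found : List String) (hnd : alphabet.Nodup) :
    pvInnerA country letters alphabet found =
      (alphabet.filter (fun x => !letters.contains x),
       if letters.any (fun l => alphabet.contains l)
         then (if found.contains country then found else found ++ [country]) else found) := by
  induction letters generalizing alphabet found with
  | nil => simp [pvInnerA]
  | cons l rest ih =>
    by_cases hl : alphabet.contains l
    · have hmem : l ∈ alphabet := by simpa using hl
      have hrem : (PySem.List.remove? alphabet l).getD alphabet = alphabet.erase l := by
        rw [PySem.List.remove?_eq_some_erase _ _ hmem]; rfl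
      have herase : alphabet.erase l = alphabet.filter (fun x => x != l) :=
        hnd.erase_eq_filter l
      have hfc : (if found.contains country then found else found ++ [country]).contains country = true := by
        by_cases h : country ∈ found <;> simp [h]
      rw [pvInnerA, if_pos hl, hrem, herase, ih _ _ (hnd.filter _)]
      refine Prod.ext ?_ ?_
      · show (alphabet.filter (fun x => x != l)).filter (fun x => !rest.contains x) = _
        rw [List.filter_filter]
        apply List.filter_congr
        intro x hx
        by_cases hxl : x = l <;> simp [hxl]
      · show (if rest.any _ then _ else _) = _
        simp only [hfc, if_true]
        have hcons : (l :: rest).any (fun l' => alphabet.contains l') = true := by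
          simp only [List.any_cons, hl, Bool.true_or]
        rw [hcons, if_pos rfl]
        split <;> rfl
    · rw [pvInnerA, if_neg hl, ih _ _ hnd]
      have hlmem : l ∉ alphabet := by simpa using hl
      refine Prod.ext ?_ ?_
      · apply List.filter_congr
        intro x hx
        have hne : x ≠ l := fun h => hlmem (h ▸ hx)
        simp [hne]
      · have hl' : alphabet.contains l = false := by simpa using hl
        have hcons : (l :: rest).any (fun l' => alphabet.contains l') =
            rest.any (fun l' => alphabet.contains l') := by
          simp only [List.any_cons, hl', Bool.false_or]
        rw [hcons]

-- once every letter of the alphabet is seen, the greedy fold leaves the state unchanged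
theorem pvFold_saturated (cs : List String) (seen : PySem.Set Char) (found : List String)
    (hsat : ∀ ch ∈ azChars, ch ∈ seen) :
    cs.foldl pvGStep (seen, found) = (seen, found) := by
  induction cs with
  | nil => rfl
  | cons c rest ih =>
    have hnew : PySem.Set.diff (PySem.Set.inter pvAZ (PySem.Set.ofList c.toList)) seen = [] := by
      apply List.filter_eq_nil_iff.mpr
      intro x hx
      have hxaz : x ∈ azChars := by
        have := (List.mem_filter.mp hx).1
        exact (PySem.Set.mem_ofList _ _).mp this
      have := hsat x hxaz
      simp [PySem.Set.contains, this]
    rw [List.foldl_cons,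
      show pvGStep (seen, found) c = (seen, found) by simp [pvGStep, hnew]]
    exact ih

theorem pvOuterA_eq (cs : List String) (seen : PySem.Set Char) (found : List String)
    (hinv : ∀ c ∈ found, ∀ ch ∈ c.toList, ch ∈ azChars → ch ∈ seen) :
    pvOuterA cs (azChars.filter (fun ch => !seen.contains ch)) found =
      (cs.foldl pvGStep (seen, found)).2 := by
  induction cs generalizing seen found with
  | nil => rfl
  | cons c rest ih =>
    have hndaz : azChars.Nodup := by decide
    set A0 := azChars.filter (fun ch => !seen.contains ch) with hA0
    have hnd : A0.Nodup := hndaz.filter _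
    set new := PySem.Set.diff (PySem.Set.inter pvAZ (PySem.Set.ofList c.toList)) seen with hnewdef
    have hmem_new : ∀ x, x ∈ new ↔ (x ∈ azChars ∧ x ∈ c.toList ∧ x ∉ seen) := by
      intro x
      simp only [hnewdef, PySem.Set.diff, PySem.Set.inter, List.mem_filter, PySem.Set.contains]
      constructor
      · rintro ⟨⟨h1, h2⟩, h3⟩
        refine ⟨(PySem.Set.mem_ofList _ _).mp h1, ?_, ?_⟩
        · have h2' : x ∈ PySem.Set.ofList c.toList := by simpa using h2
          exact (PySem.Set.mem_ofList _ _).mp h2'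
        · intro hmem; simp [hmem] at h3
      · rintro ⟨h1, h2, h3⟩
        refine ⟨⟨(PySem.Set.mem_ofList _ _).mpr h1, ?_⟩, by simp [h3]⟩
        simp [(PySem.Set.mem_ofList (c.toList) x).mpr h2]
    have hmem_A0 : ∀ x, x ∈ A0 ↔ (x ∈ azChars ∧ x ∉ seen) := by
      intro x; simp [hA0, List.mem_filter, PySem.Set.contains]
    have hany_iff : (c.toList.any (fun l => A0.contains l) = true) ↔ new ≠ [] := by
      constructor
      · rintro h hnil
        obtain ⟨l, hl, hlc⟩ := List.any_eq_true.mp h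
        have hlA0 : l ∈ A0 := by simpa using hlc
        have hl2 := (hmem_A0 l).mp hlA0
        have : l ∈ new := (hmem_new l).mpr ⟨hl2.1, hl, hl2.2⟩
        rw [hnil] at this; exact absurd this (List.not_mem_nil)
      · intro h
        obtain ⟨x, hx⟩ := List.exists_mem_of_ne_nil _ h
        obtain ⟨h1, h2, h3⟩ := (hmem_new x).mp hx
        exact List.any_eq_true.mpr ⟨x, h2, by simp [(hmem_A0 x).mpr ⟨h1, h3⟩]⟩
    rw [pvOuterA]
    show (if (pvInnerA c c.toList A0 found).1 = [] ∧ (pvInnerA c c.toList A0 found).2.length ≤ 1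
          then (pvInnerA c c.toList A0 found).2
          else pvOuterA rest (pvInnerA c c.toList A0 found).1 (pvInnerA c c.toList A0 found).2) = _
    rw [pvInnerA_eq _ _ _ _ hnd]
    by_cases hne : new = []
    · -- no new letter: A appends nothing, the greedy state is unchanged
      have hany : (c.toList.any (fun l => A0.contains l)) = false := by
        by_contra h
        exact (hany_iff.mp (Bool.of_not_eq_false h)) hne
      have hfix : A0.filter (fun x => !c.toList.contains x) = A0 := by
        apply List.filter_eq_self.mpr
        intro x hx
        by_contra h
        have hxc : x ∈ c.toList := by simpa using h
        obtain ⟨h1, h2⟩ := (hmem_A0 x).mp hx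
        have : x ∈ new := (hmem_new x).mpr ⟨h1, hxc, h2⟩
        rw [hne] at this; exact absurd this (List.not_mem_nil)
      have hstep : pvGStep (seen, found) c = (seen, found) := by
        simp only [pvGStep]
        rw [← hnewdef, if_pos hne]
      rw [List.foldl_cons, hstep]
      simp only [hfix, hany, Bool.false_eq_true, if_false]
      split_ifs with hbr
      · rw [pvFold_saturated]
        intro ch hch
        by_contra hnot
        have : ch ∈ A0 := (hmem_A0 ch).mpr ⟨hch, hnot⟩
        rw [hbr.1] at this; exact absurd this (List.not_mem_nil)
      · exact ih seen found hinv
    · -- some new letter: both append the country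
      have hany : (c.toList.any (fun l => A0.contains l)) = true := hany_iff.mpr hne
      have hcnot : found.contains c = false := by
        by_contra h
        have hcmem : c ∈ found := by simpa using Bool.of_not_eq_false h
        obtain ⟨l, hl, hlc⟩ := List.any_eq_true.mp hany
        have hlA0 : l ∈ A0 := by simpa using hlc
        obtain ⟨h1, h2⟩ := (hmem_A0 l).mp hlA0
        exact h2 (hinv c hcmem l hl h1)
      set seen' := PySem.Set.union seen new with hseen'
      have hmem_seen' : ∀ x, x ∈ seen' ↔ x ∈ seen ∨ x ∈ new := by
        intro x; exact PySem.Set.mem_union _ _ _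
      have hfix : A0.filter (fun x => !c.toList.contains x) =
          azChars.filter (fun ch => !seen'.contains ch) := by
        rw [hA0, List.filter_filter]
        apply List.filter_congr
        intro x hx
        by_cases hs : x ∈ seen'
        · rcases (hmem_seen' x).mp hs with h | h
          · simp [PySem.Set.contains, h, hs]
          · obtain ⟨_, h2, h3⟩ := (hmem_new x).mp h
            simp [PySem.Set.contains, h2, h3, hs]
        · have h1 : x ∉ seen := fun h => hs ((hmem_seen' x).mpr (Or.inl h))
          have h2 : x ∉ c.toList := fun h =>
            hs ((hmem_seen' x).mpr (Or.inr ((hmem_new x).mpr ⟨hx, h, h1⟩)))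
          simp [PySem.Set.contains, h1, h2, hs]
      have hstep : pvGStep (seen, found) c = (seen', found ++ [c]) := by
        simp only [pvGStep]
        rw [← hnewdef, if_neg hne]
      rw [List.foldl_cons, hstep]
      simp only [hany, if_true, hcnot, Bool.false_eq_true, if_false, hfix]
      have hinv' : ∀ c' ∈ found ++ [c], ∀ ch ∈ c'.toList, ch ∈ azChars → ch ∈ seen' := by
        intro c' hc' ch hch haz
        rcases List.mem_append.mp hc' with h | h
        · exact (hmem_seen' ch).mpr (Or.inl (hinv c' h ch hch haz))
        · have hc'c : c' = c := by simpa using h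
          subst hc'c
          by_cases hs : ch ∈ seen
          · exact (hmem_seen' ch).mpr (Or.inl hs)
          · exact (hmem_seen' ch).mpr (Or.inr ((hmem_new ch).mpr ⟨haz, hch, hs⟩))
      split_ifs with hbr
      · rw [pvFold_saturated]
        intro ch hch
        by_contra hnot
        have : ch ∈ azChars.filter (fun ch => !seen'.contains ch) := by
          simp [List.mem_filter, hch, PySem.Set.contains, hnot]
        rw [hbr.1] at this; exact absurd this (List.not_mem_nil)
      · exact ih seen' (found ++ [c]) hinv'

-- ========== bridge from the greedy fold to B's letter-driven algorithm ==========

-- the greedy fold's found-list, recursively (strings selected, prefix dropped)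
def pvGSel (seen : PySem.Set Char) : List String → List String
  | [] => []
  | c :: rest =>
    let new := PySem.Set.diff (PySem.Set.inter pvAZ (PySem.Set.ofList c.toList)) seen
    if new = [] then pvGSel seen rest else c :: pvGSel (PySem.Set.union seen new) rest

-- the corresponding index list
def pvGIdx (seen : PySem.Set Char) : List String → List Int
  | [] => []
  | c :: rest =>
    let new := PySem.Set.diff (PySem.Set.inter pvAZ (PySem.Set.ofList c.toList)) seen
    if new = [] then (pvGIdx seen rest).map (· + 1)
    else 0 :: (pvGIdx (PySem.Set.union seen new) rest).map (· + 1)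

-- index of the first string containing ch
def pvFirst : List String → Char → Option Int
  | [], _ => none
  | c :: rest, ch => if c.toList.contains ch then some 0 else (pvFirst rest ch).map (· + 1)

theorem pvFoldG_eq (ls : List String) (seen : PySem.Set Char) (found : List String) :
    (ls.foldl pvGStep (seen, found)).2 = found ++ pvGSel seen ls := by
  induction ls generalizing seen found with
  | nil => simp [pvGSel]
  | cons c rest ih =>
    rw [List.foldl_cons]
    by_cases hne : PySem.Set.diff (PySem.Set.inter pvAZ (PySem.Set.ofList c.toList)) seen = []
    · rw [show pvGStep (seen, found) c = (seen, found) by simp [pvGStep, hne], ih]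
      simp [pvGSel, hne]
    · rw [show pvGStep (seen, found) c =
          (PySem.Set.union seen (PySem.Set.diff (PySem.Set.inter pvAZ (PySem.Set.ofList c.toList)) seen), found ++ [c]) by
        simp [pvGStep, hne], ih]
      simp [pvGSel, hne]

theorem pvInnerB_eq (ch : Char) (s : PySem.Set Int) (ls : List String) (n : Int) :
    pvInnerB ch s (PySem.List.enumerate ls n) =
      match pvFirst ls ch with
      | some i => PySem.Set.add s (n + i)
      | none => s := by
  induction ls generalizing n with
  | nil => simp [pvFirst, PySem.List.enumerate_nil, pvInnerB]
  | cons c rest ih =>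
    rw [PySem.List.enumerate_cons]
    by_cases h : ch ∈ c.toList
    · simp [pvInnerB, pvFirst, h]
    · have hc : ¬ (c.toList.contains ch = true) := by simpa using h
      simp only [pvInnerB, pvFirst, if_neg hc]
      rw [ih]
      cases hf : pvFirst rest ch with
      | none => simp
      | some i =>
        simp only [Option.map_some]
        rw [show n + 1 + i = n + (i + 1) by ring]

-- the foldl over letters builds set(filterMap pvFirst)
theorem pvFoldB_eq (l : List Char) (ls : List String) (s : PySem.Set Int) :
    l.foldl (fun s ch => pvInnerB ch s (PySem.List.enumerate ls 0)) s =
      (l.filterMap (pvFirst ls)).foldl PySem.Set.add s := by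
  induction l generalizing s with
  | nil => rfl
  | cons ch rest ih =>
    rw [List.foldl_cons, pvInnerB_eq]
    cases hf : pvFirst ls ch with
    | none => rw [List.filterMap_cons_none hf]; exact ih s
    | some i =>
      simp only [List.filterMap_cons, hf, List.foldl_cons]
      rw [show (0 : Int) + i = i by ring]
      exact ih _

theorem pvGIdx_nonneg (ls : List String) (seen : PySem.Set Char) :
    ∀ i ∈ pvGIdx seen ls, 0 ≤ i := by
  induction ls generalizing seen with
  | nil => simp [pvGIdx]
  | cons c rest ih =>
    intro i hi
    simp only [pvGIdx] at hi
    split at hi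
    · obtain ⟨j, hj, rfl⟩ := List.mem_map.mp hi
      have := ih _ _ hj; omega
    · rcases List.mem_cons.mp hi with rfl | h
      · omega
      · obtain ⟨j, hj, rfl⟩ := List.mem_map.mp h
        have := ih _ _ hj; omega

theorem pvGIdx_sorted (ls : List String) (seen : PySem.Set Char) :
    (pvGIdx seen ls).Pairwise (· < ·) := by
  induction ls generalizing seen with
  | nil => simp [pvGIdx]
  | cons c rest ih =>
    simp only [pvGIdx]
    split
    · exact (List.pairwise_map).mpr ((ih _).imp (by omega))
    · refine List.pairwise_cons.mpr ⟨?_, (List.pairwise_map).mpr ((ih _).imp (by omega))⟩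
      intro j hj
      obtain ⟨k, hk, rfl⟩ := List.mem_map.mp hj
      have := pvGIdx_nonneg _ _ _ hk; omega

theorem pvGIdx_mem (ls : List String) (seen : PySem.Set Char) (i : Int) :
    i ∈ pvGIdx seen ls ↔ ∃ ch, ch ∈ azChars ∧ ch ∉ seen ∧ pvFirst ls ch = some i := by
  induction ls generalizing seen i with
  | nil => simp [pvGIdx, pvFirst]
  | cons c rest ih =>
    have hmem_new : ∀ x, x ∈ PySem.Set.diff (PySem.Set.inter pvAZ (PySem.Set.ofList c.toList)) seen
        ↔ (x ∈ azChars ∧ x ∈ c.toList ∧ x ∉ seen) := by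
      intro x
      rw [PySem.Set.mem_diff, PySem.Set.mem_inter, PySem.Set.mem_ofList]
      unfold pvAZ
      rw [PySem.Set.mem_ofList]
      tauto
    simp only [pvGIdx]
    split
    · rename_i hnil
      constructor
      · intro hi
        obtain ⟨j, hj, rfl⟩ := List.mem_map.mp hi
        obtain ⟨ch, h1, h2, h3⟩ := (ih _ _).mp hj
        refine ⟨ch, h1, h2, ?_⟩
        have hcc : ch ∉ c.toList := by
          intro hcc
          have : ch ∈ PySem.Set.diff (PySem.Set.inter pvAZ (PySem.Set.ofList c.toList)) seen :=
            (hmem_new ch).mpr ⟨h1, hcc, h2⟩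
          rw [hnil] at this; exact absurd this (List.not_mem_nil)
        simp [pvFirst, hcc, h3]
      · rintro ⟨ch, h1, h2, h3⟩
        have hcc : ch ∉ c.toList := by
          intro hcc
          have : ch ∈ PySem.Set.diff (PySem.Set.inter pvAZ (PySem.Set.ofList c.toList)) seen :=
            (hmem_new ch).mpr ⟨h1, hcc, h2⟩
          rw [hnil] at this; exact absurd this (List.not_mem_nil)
        simp only [pvFirst] at h3
        rw [if_neg (by simpa using hcc)] at h3
        obtain ⟨j, hj, rfl⟩ := Option.map_eq_some_iff.mp h3
        exact List.mem_map.mpr ⟨j, (ih _ _).mpr ⟨ch, h1, h2, hj⟩, rfl⟩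
    · rename_i hnil
      constructor
      · intro hi
        rcases List.mem_cons.mp hi with rfl | h
        · obtain ⟨x, hx⟩ := List.exists_mem_of_ne_nil _ hnil
          obtain ⟨h1, h2, h3⟩ := (hmem_new x).mp hx
          exact ⟨x, h1, h3, by simp [pvFirst, h2]⟩
        · obtain ⟨j, hj, rfl⟩ := List.mem_map.mp h
          obtain ⟨ch, h1, h2, h3⟩ := (ih _ _).mp hj
          have h2' : ch ∉ seen := fun hs => h2 ((PySem.Set.mem_union _ _ _).mpr (Or.inl hs))
          have hcc : ch ∉ c.toList := by
            intro hcc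
            exact h2 ((PySem.Set.mem_union _ _ _).mpr
              (Or.inr ((hmem_new ch).mpr ⟨h1, hcc, h2'⟩)))
          exact ⟨ch, h1, h2', by simp [pvFirst, hcc, h3]⟩
      · rintro ⟨ch, h1, h2, h3⟩
        by_cases hcc : ch ∈ c.toList
        · simp only [pvFirst] at h3
          rw [if_pos (by simpa using hcc)] at h3
          exact List.mem_cons.mpr (Or.inl (Option.some.injEq _ _ ▸ h3).symm)
        · simp only [pvFirst] at h3
          rw [if_neg (by simpa using hcc)] at h3
          obtain ⟨j, hj, rfl⟩ := Option.map_eq_some_iff.mp h3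
          refine List.mem_cons.mpr (Or.inr (List.mem_map.mpr ⟨j, (ih _ _).mpr ⟨ch, h1, ?_, hj⟩, rfl⟩))
          intro hu
          rcases (PySem.Set.mem_union _ _ _).mp hu with hs | hn
          · exact h2 hs
          · exact hcc ((hmem_new ch).mp hn).2.1

theorem pvGSel_eq_map (ls : List String) (seen : PySem.Set Char) :
    pvGSel seen ls = (pvGIdx seen ls).map (fun i => PySem.List.pyGetD ls i "") := by
  induction ls generalizing seen with
  | nil => rfl
  | cons c rest ih =>
    have hshift : ∀ (j : Int), 0 ≤ j →
        PySem.List.pyGetD (c :: rest) (j + 1) "" = PySem.List.pyGetD rest j "" := by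
      intro j hj
      obtain ⟨k, rfl⟩ := Int.eq_ofNat_of_zero_le hj
      rw [show ((k : Int) + 1) = ((k + 1 : Nat) : Int) by push_cast; ring]
      rw [PySem.List.pyGetD_natCast, PySem.List.pyGetD_natCast]
      simp
    simp only [pvGSel, pvGIdx]
    split
    · rw [ih, List.map_map]
      apply List.map_congr_left
      intro j hj
      simpa using (hshift j (pvGIdx_nonneg _ _ _ hj)).symm
    · rw [ih, List.map_cons, List.map_map]
      refine congrArg₂ List.cons
        (by simp [PySem.List.pyGetD, PySem.List.pyGet?, PySem.List.pyIdx?]) ?_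
      apply List.map_congr_left
      intro j hj
      simpa using (hshift j (pvGIdx_nonneg _ _ _ hj)).symm

-- ===== VERDICT (by name: the statement is the Claim_ definition above) =====
theorem alphabet_set_spec : Claim_equal_alphabet_set := by
  intro countries _
  show alphabet_set countries = alphabet_set_alt countries
  set ls := countries.map PySem.Str.lower with hls
  -- A = greedy fold
  have hA : alphabet_set countries = (ls.foldl pvGStep ((PySem.Set.empty : PySem.Set Char), ([] : List String))).2 := by
    rw [alphabet_set, ← hls]
    have h0 : azChars = azChars.filter (fun ch => !(PySem.Set.empty : PySem.Set Char).contains ch) := by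
      decide
    rw [h0]
    exact pvOuterA_eq _ _ _ (fun c hc => absurd hc (List.not_mem_nil))
  rw [hA, pvFoldG_eq, List.nil_append, pvGSel_eq_map]
  -- B side: the idx set is set(filterMap pvFirst), sorted to pvGIdx
  show _ = alphabet_set_alt countries
  rw [alphabet_set_alt, ← hls]
  simp only [pvFoldB_eq]
  rw [show (azChars.filterMap (pvFirst ls)).foldl PySem.Set.add (PySem.Set.empty : PySem.Set Int)
      = PySem.Set.ofList (azChars.filterMap (pvFirst ls)) from
    (PySem.Set.ofList_eq_foldl _).symm]
  have hsorted : PySem.List.sorted (PySem.Set.ofList (azChars.filterMap (pvFirst ls))) (fun x => x) false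
      = pvGIdx PySem.Set.empty ls := by
    apply PySem.List.sorted_eq_of_perm_of_pairwise_lt
    · have hnd : (pvGIdx PySem.Set.empty ls).Nodup :=
        List.Pairwise.imp ne_of_lt (pvGIdx_sorted ls _)
      apply (List.perm_ext_iff_of_nodup hnd (PySem.Set.nodup_ofList _)).mpr
      intro i
      rw [PySem.Set.mem_ofList, List.mem_filterMap, pvGIdx_mem]
      constructor
      · rintro ⟨ch, h1, _, h3⟩; exact ⟨ch, h1, h3⟩
      · rintro ⟨ch, h1, h3⟩
        exact ⟨ch, h1, fun h => absurd h (List.not_mem_nil), h3⟩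
    · exact pvGIdx_sorted ls _
  rw [hsorted]
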